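-- pv_equiv track=rewrite | github.com/nbeguier/Guy-De-Cointet | scripts/search_pattern.py | remap_punct
-- ===== SOURCE A (Python) =====
-- def remap_punct(punct, cipher_lines, joins):
--     """Recalcule les indices de ponctuation après application des joins."""
--     # Construire la liste des groupes originaux avec leurs indices globaux
--     flat = []
--     for line in cipher_lines:
--         flat.extend(line)
--
--     # Construire le mapping original_idx -> new_idx après joins
--     # (les groupes fusionnés héritent de la ponctuation du dernier groupe fusionné)
--     remapped = {}
--     new_idx = 0
--     orig_idx = 0
--     n_lines = len(cipher_lines)
--
--     # Reconstruire en simulant les joins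
--     for line_i, line in enumerate(cipher_lines):
--         for pos_in_line, length in enumerate(line):
--             is_last_of_line = (pos_in_line == len(line) - 1)
--             is_last_line = (line_i == n_lines - 1)
--             join_next = (not is_last_line) and is_last_of_line and joins[line_i]
--
--             if join_next:
--                 # Ce groupe va être fusionné avec le suivant : on ne crée pas de new_idx
--                 if orig_idx in punct:
--                     remapped[new_idx] = punct[orig_idx]  # ponct provisoire
--             else:
--                 if orig_idx in punct:
--                     remapped[new_idx] = punct[orig_idx]
--                 new_idx += 1
--             orig_idx += 1
--
--     return remapped
-- ===== SOURCE B (Python) =====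
-- def remap_punct(punct, cipher_lines, joins):
--     """Recalcule les indices de ponctuation après application des joins."""
--     total = sum(len(line) for line in cipher_lines)
--     # global indices of the join-merged groups (last group of a non-empty,
--     # non-last line whose join flag is set); they are strictly increasing
--     merged = []
--     acc = 0
--     for i, line in enumerate(cipher_lines):
--         acc += len(line)
--         if line and i < len(cipher_lines) - 1 and joins[i]:
--             merged.append(acc - 1)
--     # the new index of an original group is its rank among non-merged groups
--     # below it: orig - #{m in merged : m < orig} (a merged group shares the
--     # counter of its successor, so the same formula covers it).
--     remapped = {}
--     for orig in sorted(k for k in punct if 0 <= k < total):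
--         shift = sum(1 for m in merged if m < orig)
--         remapped[orig - shift] = punct[orig]
--     return remapped
-- ===== Notes on version B (the rewrite author's own statement) =====
-- stated objective: alternative
-- what changed: Replaces A's group-by-group simulation of the joins (nested loops advancing a new-index counter over every group) by a prefix-sum computation of the merged groups' global indices and a direct rank formula orig - #{merged < orig} applied to the sorted punctuation keys only.
import Mathlib
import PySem

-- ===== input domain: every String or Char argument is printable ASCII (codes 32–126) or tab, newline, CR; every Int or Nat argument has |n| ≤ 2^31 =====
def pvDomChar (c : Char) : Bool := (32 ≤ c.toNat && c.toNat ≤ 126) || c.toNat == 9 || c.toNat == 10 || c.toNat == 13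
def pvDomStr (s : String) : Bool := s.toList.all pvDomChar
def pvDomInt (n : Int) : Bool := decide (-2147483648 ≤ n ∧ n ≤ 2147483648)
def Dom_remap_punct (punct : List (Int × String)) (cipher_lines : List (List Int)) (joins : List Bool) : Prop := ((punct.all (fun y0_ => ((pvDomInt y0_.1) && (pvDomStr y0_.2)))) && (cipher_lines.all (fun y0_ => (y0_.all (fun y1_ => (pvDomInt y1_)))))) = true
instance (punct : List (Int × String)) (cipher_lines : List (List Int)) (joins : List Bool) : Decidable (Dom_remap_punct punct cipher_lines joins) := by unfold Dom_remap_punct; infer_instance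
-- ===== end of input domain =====

-- B drops A's group-by-group join simulation: it computes the merged groups' global indices by
-- prefix sums and remaps each punctuation key directly by the rank formula orig - #{merged < orig},
-- iterating over the sorted punctuation keys only (objective: alternative).


-- ===== PORT A =====
-- inner loop: 'for pos_in_line, length in enumerate(line)' over the remaining groups of a line
def remapA_inner (P : PySem.Dict Int String) (joins : List Bool) (line_i n_lines lineLen : Nat) :
    Nat → List Int → PySem.Dict Int String × Int × Int → PySem.Dict Int String × Int × Int
  | _, [], st => st
  | pos, _length :: rest, (remapped, new_idx, orig_idx) =>
    let is_last_of_line := pos == lineLen - 1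
    let is_last_line := line_i == n_lines - 1
    -- joins[line_i] is only reached under Pre_; getD is its total form
    let join_next := !is_last_line && is_last_of_line && joins.getD line_i false
    if join_next then
      remapA_inner P joins line_i n_lines lineLen (pos + 1) rest
        ((match P.get? orig_idx with
          | some v => remapped.insert new_idx v
          | none => remapped), new_idx, orig_idx + 1)
    else
      remapA_inner P joins line_i n_lines lineLen (pos + 1) rest
        ((match P.get? orig_idx with
          | some v => remapped.insert new_idx v
          | none => remapped), new_idx + 1, orig_idx + 1)

-- outer loop: 'for line_i, line in enumerate(cipher_lines)'
def remapA_outer (P : PySem.Dict Int String) (joins : List Bool) (n_lines : Nat) :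
    Nat → List (List Int) → PySem.Dict Int String × Int × Int → PySem.Dict Int String × Int × Int
  | _, [], st => st
  | line_i, line :: rest, st =>
    remapA_outer P joins n_lines (line_i + 1) rest
      (remapA_inner P joins line_i n_lines line.length 0 line st)

def remap_punct (punct : List (Int × String)) (cipher_lines : List (List Int)) (joins : List Bool) : List (Int × String) :=
  let _flat := cipher_lines.foldl (fun acc line => acc ++ line) ([] : List Int)  -- A builds 'flat' and never uses it
  let P := PySem.Dict.ofList punct
  (remapA_outer P joins cipher_lines.length 0 cipher_lines ((PySem.Dict.empty : PySem.Dict Int String), 0, 0)).1.items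

-- ===== PORT B =====
-- global indices of the join-merged groups, by prefix sums of the line lengths
-- ('for i, line in enumerate(cipher_lines): acc += len(line); if line and i < n-1 and joins[i]: merged.append(acc-1)')
def altMerged (joins : List Bool) (nlines : Nat) : Nat → Int → List (List Int) → List Int
  | _, _, [] => []
  | i, acc, line :: rest =>
    let acc' := acc + line.length
    (if line ≠ [] ∧ i < nlines - 1 ∧ joins.getD i false = true then [acc' - 1] else []) ++
      altMerged joins nlines (i + 1) acc' rest

-- 'for orig in sorted(valid keys): remapped[orig - shift] = punct[orig]'
def altApply (P : PySem.Dict Int String) (merged : List Int) :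
    List Int → PySem.Dict Int String → PySem.Dict Int String
  | [], d => d
  | k :: rest, d =>
    let shift : Int := merged.countP (fun m => decide (m < k))
    altApply P merged rest
      (match P.get? k with
       | some v => d.insert (k - shift) v
       | none => d)  -- unreachable: k is a key of P

def remap_punct_alt (punct : List (Int × String)) (cipher_lines : List (List Int)) (joins : List Bool) : List (Int × String) :=
  let P := PySem.Dict.ofList punct
  let total : Int := (cipher_lines.map (fun l => (l.length : Int))).sum
  let merged := altMerged joins cipher_lines.length 0 0 cipher_lines
  let keysIn := PySem.List.sorted (P.keys.filter fun k => decide (0 ≤ k) && decide (k < total)) (fun x => x) false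
  (altApply P merged keysIn (PySem.Dict.empty : PySem.Dict Int String)).items

-- ===== PRECONDITION & SPEC =====
-- Pre_ excludes exactly the inputs on which Python A raises IndexError: a non-last, non-empty
-- line whose index is out of range of 'joins' (B raises there too).
def Pre_remap_punct (punct : List (Int × String)) (cipher_lines : List (List Int)) (joins : List Bool) : Prop :=
  ∀ i < cipher_lines.length - 1, cipher_lines.getD i [] ≠ [] → i < joins.length
instance (punct : List (Int × String)) (cipher_lines : List (List Int)) (joins : List Bool) : Decidable (Pre_remap_punct punct cipher_lines joins) := by unfold Pre_remap_punct; infer_instance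
def pvWitness_remap_punct : (List (Int × String)) × List (List Int) × List Bool :=
  ([(0, ","), (2, ".")], ([[2, 3], [1]], [true]))
def Spec_remap_punct (punct : List (Int × String)) (cipher_lines : List (List Int)) (joins : List Bool) (out : List (Int × String)) : Prop := out = remap_punct_alt punct cipher_lines joins
instance (punct : List (Int × String)) (cipher_lines : List (List Int)) (joins : List Bool) (out : List (Int × String)) : Decidable (Spec_remap_punct punct cipher_lines joins out) := by unfold Spec_remap_punct; infer_instance

-- ===== CLAIM (what is proved, stated in full; the proofs are below) =====
def Claim_equal_remap_punct : Prop := ∀ (punct : List (Int × String)) (cipher_lines : List (List Int)) (joins : List Bool), Dom_remap_punct punct cipher_lines joins → Pre_remap_punct punct cipher_lines joins → Spec_remap_punct punct cipher_lines joins (remap_punct punct cipher_lines joins)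

-- ===== LEMMAS AND PROOFS =====

-- Proof-only intermediate: A's pass rebuilt as "emit the table of new indices, then apply it".
def tblLine (joins : List Bool) (line_i last_line lineLen : Nat) :
    Nat → List Int → List Int → Int → List Int × Int
  | _, [], tbl, new_idx => (tbl, new_idx)
  | pos, _length :: rest, tbl, new_idx =>
    let merged := pos == lineLen - 1 && decide (line_i < last_line) && joins.getD line_i false
    tblLine joins line_i last_line lineLen (pos + 1) rest (tbl ++ [new_idx])
      (if merged then new_idx else new_idx + 1)

def tblLines (joins : List Bool) (last_line : Nat) :
    Nat → List (List Int) → List Int × Int → List Int × Int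
  | _, [], acc => acc
  | line_i, line :: rest, (tbl, new_idx) =>
    tblLines joins last_line (line_i + 1) rest
      (tblLine joins line_i last_line line.length 0 line tbl new_idx)

def applyTbl (P : PySem.Dict Int String) : Int → List Int → PySem.Dict Int String → PySem.Dict Int String
  | _, [], d => d
  | orig, key :: rest, d =>
    applyTbl P (orig + 1) rest
      (match P.get? orig with
       | some v => d.insert key v
       | none => d)

-- the table accumulator only grows by appending
lemma tblLine_acc (joins : List Bool) (line_i last_line lineLen : Nat) :
    ∀ (gs : List Int) (pos : Nat) (tbl : List Int) (n : Int),
      tblLine joins line_i last_line lineLen pos gs tbl n =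
        (tbl ++ (tblLine joins line_i last_line lineLen pos gs [] n).1,
         (tblLine joins line_i last_line lineLen pos gs [] n).2) := by
  intro gs
  induction gs with
  | nil => intro pos tbl n; simp [tblLine]
  | cons g gs ih =>
    intro pos tbl n
    simp only [tblLine]
    rw [ih (pos + 1) (tbl ++ [n]), ih (pos + 1) ([] ++ [n])]
    simp

lemma tblLine_len (joins : List Bool) (line_i last_line lineLen : Nat) :
    ∀ (gs : List Int) (pos : Nat) (n : Int),
      (tblLine joins line_i last_line lineLen pos gs [] n).1.length = gs.length := by
  intro gs
  induction gs with
  | nil => intro pos n; simp [tblLine]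
  | cons g gs ih =>
    intro pos n
    simp only [tblLine]
    rw [tblLine_acc]
    simp [ih]

lemma tblLines_acc (joins : List Bool) (last_line : Nat) :
    ∀ (lines : List (List Int)) (line_i : Nat) (st : List Int × Int),
      tblLines joins last_line line_i lines st =
        (st.1 ++ (tblLines joins last_line line_i lines ([], st.2)).1,
         (tblLines joins last_line line_i lines ([], st.2)).2) := by
  intro lines
  induction lines with
  | nil => intro line_i st; simp [tblLines]
  | cons line rest ih =>
    intro line_i st
    obtain ⟨tbl, n⟩ := st
    simp only [tblLines]
    rw [tblLine_acc joins line_i last_line line.length line 0 tbl n]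
    rw [ih (line_i + 1) (tblLine joins line_i last_line line.length 0 line [] n)]
    rw [ih]
    simp [List.append_assoc]

lemma applyTbl_append (P : PySem.Dict Int String) :
    ∀ (t1 t2 : List Int) (o : Int) (d : PySem.Dict Int String),
      applyTbl P o (t1 ++ t2) d =
        applyTbl P (o + t1.length) t2 (applyTbl P o t1 d) := by
  intro t1
  induction t1 with
  | nil => intro t2 o d; simp [applyTbl]
  | cons k t1 ih =>
    intro t2 o d
    simp only [applyTbl, List.cons_append, ih, List.length_cons]
    congr 1
    push_cast
    ring_nf

-- the two join conditions agree while the line index is in range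
lemma cond_eq (joins : List Bool) (line_i n_lines pos lineLen : Nat) (h : line_i < n_lines) :
    ((pos == lineLen - 1 && decide (line_i < n_lines - 1) && joins.getD line_i false) : Bool) =
      (!(line_i == n_lines - 1) && (pos == lineLen - 1) && joins.getD line_i false) := by
  have hd : (decide (line_i < n_lines - 1)) = !(line_i == n_lines - 1) := by
    rcases Nat.lt_or_ge line_i (n_lines - 1) with h2 | h2
    · simp [h2, Nat.ne_of_lt h2]
    · have h3 : line_i = n_lines - 1 := by omega
      simp [h3]
  rw [hd]
  cases pos == lineLen - 1 <;> cases line_i == n_lines - 1 <;> simp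

-- A's inner loop = emit the table segment, then apply it
lemma inner_eq (P : PySem.Dict Int String) (joins : List Bool) (line_i n_lines lineLen : Nat)
    (h : line_i < n_lines) :
    ∀ (gs : List Int) (pos : Nat) (d : PySem.Dict Int String) (n o : Int),
      remapA_inner P joins line_i n_lines lineLen pos gs (d, n, o) =
        (applyTbl P o (tblLine joins line_i (n_lines - 1) lineLen pos gs [] n).1 d,
         (tblLine joins line_i (n_lines - 1) lineLen pos gs [] n).2,
         o + gs.length) := by
  intro gs
  induction gs with
  | nil => intro pos d n o; simp [remapA_inner, tblLine, applyTbl]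
  | cons g gs ih =>
    intro pos d n o
    simp only [remapA_inner, tblLine]
    rw [← cond_eq joins line_i n_lines pos lineLen h]
    rw [tblLine_acc joins line_i (n_lines - 1) lineLen gs (pos + 1) ([] ++ [n]) _]
    by_cases hj : ((pos == lineLen - 1 && decide (line_i < n_lines - 1) && joins.getD line_i false) : Bool) = true
    · simp only [hj, if_pos]
      rw [ih]
      simp [applyTbl]
      omega
    · simp only [Bool.not_eq_true] at hj
      simp only [hj, Bool.false_eq_true, if_false]
      rw [ih]
      simp [applyTbl]
      omega

-- A's outer loop = emit the whole table, then apply it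
lemma outer_eq (P : PySem.Dict Int String) (joins : List Bool) (n_lines : Nat) :
    ∀ (lines : List (List Int)) (line_i : Nat), line_i + lines.length = n_lines →
    ∀ (d : PySem.Dict Int String) (n o : Int),
      remapA_outer P joins n_lines line_i lines (d, n, o) =
        (applyTbl P o (tblLines joins (n_lines - 1) line_i lines ([], n)).1 d,
         (tblLines joins (n_lines - 1) line_i lines ([], n)).2,
         o + ((lines.map List.length).sum : Int)) := by
  intro lines
  induction lines with
  | nil => intro line_i _ d n o; simp [remapA_outer, tblLines, applyTbl]
  | cons line rest ih =>
    intro line_i hlen d n o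
    have hlt : line_i < n_lines := by simp at hlen; omega
    simp only [remapA_outer, tblLines]
    rw [inner_eq P joins line_i n_lines line.length hlt line 0 d n o]
    rw [ih (line_i + 1) (by simp at hlen ⊢; omega)]
    rw [tblLines_acc joins (n_lines - 1) rest (line_i + 1)
        (tblLine joins line_i (n_lines - 1) line.length 0 line [] n)]
    rw [applyTbl_append]
    rw [tblLine_len joins line_i (n_lines - 1) line.length line 0 n]
    simp
    ring_nf

-- every merged index lies at or above the running offset
lemma altMerged_lb (joins : List Bool) (nlines : Nat) :
    ∀ (lines : List (List Int)) (i : Nat) (acc : Int) (m : Int),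
      m ∈ altMerged joins nlines i acc lines → acc ≤ m := by
  intro lines
  induction lines with
  | nil => intro i acc m hm; simp [altMerged] at hm
  | cons line rest ih =>
    intro i acc m hm
    simp only [altMerged, List.mem_append] at hm
    rcases hm with hm | hm
    · split at hm
      · rename_i hc
        simp at hm
        have hl : 0 < line.length := List.length_pos_of_ne_nil hc.1
        omega
      · simp at hm
    · have := ih (i + 1) (acc + line.length) m hm
      have : (0:Int) ≤ line.length := by positivity
      omega

-- one line of the table: consecutive counters; the counter skips the last group when merged
lemma tblLine_char (joins : List Bool) (line_i last lineLen : Nat) :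
    ∀ (gs : List Int) (pos : Nat) (n : Int), pos + gs.length = lineLen →
      tblLine joins line_i last lineLen pos gs [] n =
        ((List.range gs.length).map (fun (j : Nat) => n + (j : Int)),
         n + gs.length -
           (if gs ≠ [] ∧ line_i < last ∧ joins.getD line_i false = true then 1 else 0)) := by
  intro gs
  induction gs with
  | nil => intro pos n _; simp [tblLine]
  | cons g gs ih =>
    intro pos n hinv
    simp only [tblLine]
    rw [tblLine_acc]
    by_cases hg : gs = []
    · subst hg
      have hpos : (pos == lineLen - 1) = true := by
        simp only [List.length_cons, List.length_nil] at hinv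
        simp; omega
      simp [tblLine, hpos]
      by_cases hl : line_i < last <;>
        by_cases hj : joins[line_i]?.getD false = true <;>
          simp [hl, hj]
    · have hpos : (pos == lineLen - 1) = false := by
        have : 0 < gs.length := List.length_pos_of_ne_nil hg
        simp only [List.length_cons] at hinv
        simp; omega
      simp only [hpos, Bool.false_and, if_neg (by simp : ¬ (false = true))]
      rw [ih (pos + 1) (n + 1) (by simp at hinv ⊢; omega)]
      rw [Prod.mk.injEq]
      refine ⟨?_, ?_⟩
      · simp only [List.length_cons, List.nil_append, List.range_succ_eq_map, List.map_cons,
          List.map_map, Nat.cast_zero, add_zero, List.singleton_append]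
        congr 1
        apply List.map_congr_left
        intro j _
        simp [Function.comp]
        omega
      · have hC : (g :: gs ≠ [] ∧ line_i < last ∧ joins.getD line_i false = true)
            ↔ (gs ≠ [] ∧ line_i < last ∧ joins.getD line_i false = true) := by simp [hg]
        simp only [List.length_cons]
        rw [if_congr hC rfl rfl]
        push_cast; ring_nf

-- the whole table: entry for global index o + j is n + j - #{merged below o + j}
lemma tbl_char (joins : List Bool) (nlines : Nat) :
    ∀ (lines : List (List Int)) (line_i : Nat) (o n : Int),
      tblLines joins (nlines - 1) line_i lines ([], n) =
        ((List.range (lines.map List.length).sum).map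
           (fun (j : Nat) => n + (j : Int) -
             ((altMerged joins nlines line_i o lines).countP
               (fun m => decide (m < o + (j : Int))) : Int)),
         n + ((lines.map List.length).sum : Int) -
           (altMerged joins nlines line_i o lines).length) := by
  intro lines
  induction lines with
  | nil => intro line_i o n; simp [tblLines, altMerged]
  | cons line rest ih =>
    intro line_i o n
    have hlb := altMerged_lb joins nlines rest (line_i + 1) (o + line.length)
    simp only [tblLines, altMerged]
    rw [tblLine_char joins line_i (nlines - 1) line.length line 0 n (by simp)]
    rw [tblLines_acc]
    rw [ih (line_i + 1) (o + line.length)]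
    simp only [List.map_cons, List.sum_cons]
    by_cases hC : line ≠ [] ∧ line_i < nlines - 1 ∧ joins.getD line_i false = true
    · have hL : 0 < line.length := List.length_pos_of_ne_nil hC.1
      simp only [if_pos hC]
      rw [Prod.mk.injEq]
      refine ⟨?_, ?_⟩
      · rw [List.range_add, List.map_append, List.map_map]
        congr 1
        · apply List.map_congr_left
          intro j hj
          simp only [List.mem_range] at hj
          have h0 : List.countP (fun m => decide (m < o + (j : Int)))
              ([o + (line.length : Int) - 1] ++
                altMerged joins nlines (line_i + 1) (o + line.length) rest) = 0 := by
            rw [List.countP_eq_zero]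
            intro m hm
            rcases List.mem_append.mp hm with hm | hm
            · simp only [List.mem_singleton] at hm
              subst hm
              simp only [decide_eq_true_eq, not_lt]
              omega
            · have := hlb m hm
              simp only [decide_eq_true_eq, not_lt]
              omega
          rw [h0]
          simp
        · apply List.map_congr_left
          intro j hj
          simp only [Function.comp_apply]
          rw [List.countP_append]
          have h1 : List.countP (fun m => decide (m < o + ((line.length + j : Nat) : Int)))
              [o + (line.length : Int) - 1] = 1 := by
            simp only [List.countP_singleton]
            simp
          rw [h1]
          push_cast
          ring_nf
      · simp only [List.length_append, List.length_singleton]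
        push_cast
        ring_nf
    · simp only [if_neg hC]
      rw [Prod.mk.injEq]
      refine ⟨?_, ?_⟩
      · rw [List.range_add, List.map_append, List.map_map]
        congr 1
        · apply List.map_congr_left
          intro j hj
          simp only [List.mem_range] at hj
          have h0 : List.countP (fun m => decide (m < o + (j : Int)))
              (altMerged joins nlines (line_i + 1) (o + line.length) rest) = 0 := by
            rw [List.countP_eq_zero]
            intro m hm
            have := hlb m hm
            simp only [decide_eq_true_eq, not_lt]
            omega
          rw [List.nil_append, h0]
          simp
        · apply List.map_congr_left
          intro j hj
          simp only [Function.comp_apply, List.nil_append]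
          push_cast
          ring_nf
      · simp only [List.nil_append]
        push_cast
        ring_nf

-- applying a table whose entries are F(orig) = folding the step over the original indices
lemma applyTbl_map (P : PySem.Dict Int String) (F : Int → Int) :
    ∀ (S : Nat) (d : PySem.Dict Int String),
      applyTbl P 0 ((List.range S).map (fun (j : Nat) => F (j : Int))) d =
        (List.range S).foldl
          (fun d (j : Nat) => match P.get? (j : Int) with
            | some v => d.insert (F (j : Int)) v
            | none => d) d := by
  intro S
  induction S with
  | zero => intro d; simp [applyTbl]
  | succ S ih =>
    intro d
    rw [List.range_succ, List.map_append, List.foldl_append]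
    rw [applyTbl_append]
    simp only [List.length_map, List.length_range, List.map_cons, List.map_nil]
    rw [ih]
    simp [applyTbl]

-- a fold whose step ignores elements failing p folds over the filtered list
lemma foldl_filter_id {α δ : Type} (p : α → Bool) (g : δ → α → δ)
    (h : ∀ d x, p x = false → g d x = d) :
    ∀ (l : List α) (d : δ), l.foldl g d = (l.filter p).foldl g d := by
  intro l
  induction l with
  | nil => intro d; simp
  | cons x l ih =>
    intro d
    by_cases hx : p x = true
    · simp [hx, List.foldl_cons, ih]
    · simp only [Bool.not_eq_true] at hx
      simp [hx, List.foldl_cons, ih, h d x hx]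

-- the ascending original indices that carry punctuation = B's sorted filtered key list
lemma keys_sorted_eq (P : PySem.Dict Int String) (hnd : P.keys.Nodup) (S : Nat) :
    PySem.List.sorted (P.keys.filter fun k => decide (0 ≤ k) && decide (k < (S : Int))) (fun x => x) false =
      ((List.range S).map (fun (j : Nat) => (j : Int))).filter (fun o => (P.get? o).isSome) := by
  have hpw : (((List.range S).map (fun (j : Nat) => (j : Int))).filter
      (fun o => (P.get? o).isSome)).Pairwise (· < ·) := by
    apply List.Pairwise.filter
    apply List.Pairwise.map
    · intro a b hab
      exact_mod_cast hab
    · exact List.pairwise_lt_range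
  apply PySem.List.sorted_eq_of_perm_of_pairwise_lt
  · rw [List.perm_ext_iff_of_nodup (hpw.imp ne_of_lt) (hnd.filter _)]
    intro a
    simp only [List.mem_filter, List.mem_map, List.mem_range]
    constructor
    · rintro ⟨⟨j, hj, rfl⟩, hs⟩
      refine ⟨?_, ?_⟩
      · rw [← PySem.Dict.contains_iff_mem_keys, PySem.Dict.contains_eq_isSome_get?]
        exact hs
      · simp only [Bool.and_eq_true, decide_eq_true_eq]
        omega
    · rintro ⟨hk, hr⟩
      simp only [Bool.and_eq_true, decide_eq_true_eq] at hr
      refine ⟨⟨a.toNat, ?_, ?_⟩, ?_⟩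
      · omega
      · omega
      · rw [← PySem.Dict.contains_eq_isSome_get?, PySem.Dict.contains_iff_mem_keys]
        exact hk
  · exact hpw

lemma altApply_eq_foldl (P : PySem.Dict Int String) (merged : List Int) :
    ∀ (ks : List Int) (d : PySem.Dict Int String),
      altApply P merged ks d =
        ks.foldl (fun d k => match P.get? k with
          | some v => d.insert (k - (merged.countP (fun m => decide (m < k)) : Int)) v
          | none => d) d := by
  intro ks
  induction ks with
  | nil => intro d; simp [altApply]
  | cons k ks ih => intro d; simp only [altApply, List.foldl_cons, ih]

-- ===== VERDICT (by name: the statement is the Claim_ definition above) =====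
lemma cast_sum_lens (lines : List (List Int)) :
    (lines.map (fun l => (l.length : Int))).sum = ((lines.map List.length).sum : Int) := by
  induction lines with
  | nil => simp
  | cons l ls ih => simp [ih]

theorem remap_punct_spec : Claim_equal_remap_punct := by
  intro punct cipher_lines joins _dom _pre
  unfold Spec_remap_punct
  show (remapA_outer (PySem.Dict.ofList punct) joins cipher_lines.length 0 cipher_lines
          ((PySem.Dict.empty : PySem.Dict Int String), 0, 0)).1.items
      = (altApply (PySem.Dict.ofList punct)
          (altMerged joins cipher_lines.length 0 0 cipher_lines)
          (PySem.List.sorted ((PySem.Dict.ofList punct).keys.filter fun k =>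
              decide (0 ≤ k) && decide (k < (cipher_lines.map (fun l => (l.length : Int))).sum))
            (fun x => x) false)
          (PySem.Dict.empty : PySem.Dict Int String)).items
  congr 1
  set P := PySem.Dict.ofList punct with hPdef
  set M := altMerged joins cipher_lines.length 0 0 cipher_lines with hMdef
  set S := (cipher_lines.map List.length).sum with hSdef
  set F : Int → Int := fun x => x - (M.countP (fun m => decide (m < x)) : Int) with hFdef
  rw [outer_eq P joins cipher_lines.length cipher_lines 0 (by simp)]
  rw [tbl_char joins cipher_lines.length cipher_lines 0 0 0]
  rw [← hMdef, ← hSdef]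
  have hmap : (List.range S).map
        (fun (j : Nat) => (0 : Int) + (j : Int) -
          (M.countP (fun m => decide (m < 0 + (j : Int))) : Int)) =
      (List.range S).map (fun (j : Nat) => F (j : Int)) := by
    apply List.map_congr_left
    intro j _
    simp [hFdef]
  simp only [hmap]
  rw [applyTbl_map P F S]
  rw [cast_sum_lens, ← hSdef]
  have hfm : (List.range S).foldl
      (fun d (j : Nat) => match P.get? (j : Int) with
        | some v => d.insert (F (j : Int)) v
        | none => d) (PySem.Dict.empty : PySem.Dict Int String)
    = ((List.range S).map (fun (j : Nat) => (j : Int))).foldl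
      (fun d (k : Int) => match P.get? k with
        | some v => d.insert (F k) v
        | none => d) (PySem.Dict.empty : PySem.Dict Int String) := by
    rw [List.foldl_map]
  rw [hfm]
  rw [foldl_filter_id (fun o => (P.get? o).isSome) _
        (by
          intro d x hx
          have hn : P.get? x = none := Option.not_isSome_iff_eq_none.mp (by simp [hx])
          simp [hn])]
  rw [← keys_sorted_eq P (PySem.Dict.nodup_keys_ofList punct) S]
  rw [altApply_eq_foldl]
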